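-- pv_equiv track=rewrite | github.com/jaemilton/aws_set_default_profile | common_lib/common_base.py | array_are_equal
-- ===== SOURCE A (Python) =====
-- def array_are_equal(arr1, arr2):
--
--         if not arr1 or not arr2:
--             return False
--
--         # If lengths of array are not
--         # equal means array are not equal
--         if len(arr1) != len(arr2):
--             return False
--
--         # Linearly compare elements
--         for i in range(0, len(arr1) - 1):
--             if (arr1[i] != arr2[i]):
--                 return False
--
--         # If all elements were same.
--         return True
-- ===== SOURCE B (Python) =====
-- def array_are_equal(arr1, arr2):
--     if not arr1 or not arr2:
--         return False
--     # Single simultaneous traversal of two iterators: no len(), no indexing,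
--     # length mismatch is discovered in-scan via an exhaustion sentinel.
--     it1, it2 = iter(arr1), iter(arr2)
--     sentinel = object()
--     while True:
--         x = next(it1, sentinel)
--         y = next(it2, sentinel)
--         if x is sentinel and y is sentinel:
--             return True
--         if x is sentinel or y is sentinel or x != y:
--             return False
-- ===== Notes on version B (the rewrite author's own statement) =====
-- stated objective: alternative
-- what changed: A's staged passes (length pre-check, then an indexed loop over range(len-1)) are replaced by one simultaneous traversal of two iterators with an exhaustion sentinel: no len(), no indexing, length mismatch is detected in-scan, and every element including the last is compared.
-- intended difference: On nonempty equal-length lists that agree on all but the last element, A returns True (its loop stops at range(len-1) and never checks the last element) while B returns False, which is the intended answer for element-wise array equality. — e.g. on array_are_equal([1, 2], [1, 3]): A returns true, B returns false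
import Mathlib
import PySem

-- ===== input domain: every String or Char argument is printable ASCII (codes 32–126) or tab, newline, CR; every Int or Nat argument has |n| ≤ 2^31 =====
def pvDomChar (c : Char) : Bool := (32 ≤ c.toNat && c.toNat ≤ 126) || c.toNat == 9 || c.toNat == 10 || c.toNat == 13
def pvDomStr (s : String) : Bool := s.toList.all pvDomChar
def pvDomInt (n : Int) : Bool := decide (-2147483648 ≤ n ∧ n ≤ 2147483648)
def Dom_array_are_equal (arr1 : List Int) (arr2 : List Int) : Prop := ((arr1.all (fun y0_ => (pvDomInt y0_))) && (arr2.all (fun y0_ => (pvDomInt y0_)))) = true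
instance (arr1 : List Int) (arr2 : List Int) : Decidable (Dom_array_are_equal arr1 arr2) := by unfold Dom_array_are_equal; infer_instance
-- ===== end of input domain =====

-- B replaces A's staged passes (length pre-check + indexed loop over range(len-1)) by one
-- simultaneous traversal of both lists, detecting length mismatch in-scan and comparing every
-- element including the last one A's loop skips (see D_ below); return value only, no mutation.

-- ===== PORT A =====
-- the 'for i in range(0, len(arr1) - 1): if arr1[i] != arr2[i]: return False' loop
def pvLoopA (arr1 : List Int) (arr2 : List Int) : List Int → Bool
  | [] => true
  | i :: rest =>
      if PySem.List.pyGet? arr1 i ≠ PySem.List.pyGet? arr2 i then false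
      else pvLoopA arr1 arr2 rest

def array_are_equal (arr1 : List Int) (arr2 : List Int) : Bool :=
  if arr1 = [] ∨ arr2 = [] then false
  else if (arr1.length : Int) ≠ (arr2.length : Int) then false
  else pvLoopA arr1 arr2 (PySem.List.pyRange 0 ((arr1.length : Int) - 1) 1)

-- ===== PORT B =====
-- the sentinel while-loop over iter(arr1)/iter(arr2): both exhausted → True,
-- one exhausted or heads differ → False, else advance both iterators
def pvGo : List Int → List Int → Bool
  | [], [] => true
  | [], _ :: _ => false
  | _ :: _, [] => false
  | x :: xs, y :: ys => if x ≠ y then false else pvGo xs ys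

def array_are_equal_alt (arr1 : List Int) (arr2 : List Int) : Bool :=
  if arr1 = [] ∨ arr2 = [] then false
  else pvGo arr1 arr2

-- ===== PRECONDITION & SPEC =====
-- On nonempty equal-length lists agreeing on all but the last element, A returns true (its
-- loop never checks the last element) while B returns false, the intended answer for
-- element-wise array equality.
def D_array_are_equal (arr1 : List Int) (arr2 : List Int) : Prop :=
  arr1 ≠ [] ∧ arr2 ≠ [] ∧ arr1.length = arr2.length ∧ arr1.dropLast = arr2.dropLast ∧ arr1 ≠ arr2
instance (arr1 : List Int) (arr2 : List Int) : Decidable (D_array_are_equal arr1 arr2) := by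
  unfold D_array_are_equal; infer_instance

def Spec_array_are_equal (arr1 : List Int) (arr2 : List Int) (out : Bool) : Prop :=
  ¬ D_array_are_equal arr1 arr2 → out = array_are_equal_alt arr1 arr2
instance (arr1 : List Int) (arr2 : List Int) (out : Bool) : Decidable (Spec_array_are_equal arr1 arr2 out) := by
  unfold Spec_array_are_equal; infer_instance

def pvDiffWitness_array_are_equal : List Int × List Int := ([1, 2], [1, 3])
def pvDiffWitnessOut_array_are_equal : Bool × Bool := (true, false)

-- ===== CLAIM (what is proved, stated in full; the proofs are below) =====
def Claim_unchanged_array_are_equal : Prop := ∀ (arr1 : List Int) (arr2 : List Int), Dom_array_are_equal arr1 arr2 → Spec_array_are_equal arr1 arr2 (array_are_equal arr1 arr2)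
def Claim_changed_array_are_equal : Prop := Dom_array_are_equal (pvDiffWitness_array_are_equal.1) (pvDiffWitness_array_are_equal.2) ∧ D_array_are_equal (pvDiffWitness_array_are_equal.1) (pvDiffWitness_array_are_equal.2) ∧ array_are_equal (pvDiffWitness_array_are_equal.1) (pvDiffWitness_array_are_equal.2) = pvDiffWitnessOut_array_are_equal.1 ∧ array_are_equal_alt (pvDiffWitness_array_are_equal.1) (pvDiffWitness_array_are_equal.2) = pvDiffWitnessOut_array_are_equal.2 ∧ pvDiffWitnessOut_array_are_equal.1 ≠ pvDiffWitnessOut_array_are_equal.2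
def Claim_exact_array_are_equal : Prop := ∀ (arr1 : List Int) (arr2 : List Int), Dom_array_are_equal arr1 arr2 → D_array_are_equal arr1 arr2 → array_are_equal arr1 arr2 ≠ array_are_equal_alt arr1 arr2

-- ===== LEMMAS AND PROOFS =====

-- B's simultaneous traversal decides plain list equality
lemma pvGo_eq_decide (xs ys : List Int) : pvGo xs ys = decide (xs = ys) := by
  induction xs generalizing ys with
  | nil => cases ys <;> simp [pvGo]
  | cons x xs ih =>
      cases ys with
      | nil => simp [pvGo]
      | cons y ys =>
          simp only [pvGo, ih]
          by_cases h : x = y <;> simp [h]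

lemma pvLoopA_eq_all (arr1 arr2 : List Int) (l : List Int) :
    pvLoopA arr1 arr2 l
      = l.all (fun i => PySem.List.pyGet? arr1 i == PySem.List.pyGet? arr2 i) := by
  induction l with
  | nil => rfl
  | cons i rest ih =>
      simp only [pvLoopA, List.all_cons, ih]
      by_cases h : PySem.List.pyGet? arr1 i = PySem.List.pyGet? arr2 i <;> simp [h]

-- A's loop result, when lengths are equal, is exactly dropLast equality
lemma pvLoopA_range (arr1 arr2 : List Int) (h : arr1.length = arr2.length) :
    pvLoopA arr1 arr2 (PySem.List.pyRange 0 ((arr1.length : Int) - 1) 1)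
      = decide (arr1.dropLast = arr2.dropLast) := by
  rw [pvLoopA_eq_all]
  rcases Nat.eq_zero_or_pos arr1.length with h0 | hpos
  · have h1 : arr1 = [] := List.length_eq_zero_iff.mp h0
    have h2 : arr2 = [] := List.length_eq_zero_iff.mp (h ▸ h0)
    subst h1; subst h2; decide
  · have heq : (arr1.dropLast = arr2.dropLast) ↔
        (∀ k, (hk : k < arr1.length - 1) →
          arr1[k]'(by omega) = arr2[k]'(by omega)) := by
      constructor
      · intro hd k hk
        have := congrArg (fun l => l[k]?) hd
        simpa [List.getElem?_dropLast, hk, h ▸ hk, List.getElem?_eq_getElem,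
          (by omega : k < arr1.length), (by omega : k < arr2.length)] using this
      · intro hall
        apply List.ext_getElem
        · simp [h]
        · intro k hk1 hk2
          have hk : k < arr1.length - 1 := by simpa using hk1
          simp [List.getElem_dropLast, hall k hk]
    by_cases hd : arr1.dropLast = arr2.dropLast
    · simp only [hd, decide_true, List.all_eq_true]
      intro i hi
      rw [PySem.List.mem_pyRange_one] at hi
      obtain ⟨hi0, hi1⟩ := hi
      have hk : i.toNat < arr1.length - 1 := by omega
      have := heq.mp hd i.toNat hk
      rw [PySem.List.pyGet?_of_nonneg arr1 hi0, PySem.List.pyGet?_of_nonneg arr2 hi0]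
      simp [(by omega : i.toNat < arr1.length), (by omega : i.toNat < arr2.length), this]
    · simp only [hd, decide_false, List.all_eq_false]
      have : ¬ ∀ k, (hk : k < arr1.length - 1) → arr1[k]'(by omega) = arr2[k]'(by omega) := by
        intro hc; exact hd (heq.mpr hc)
      push Not at this
      obtain ⟨k, hk, hne⟩ := this
      refine ⟨(k : Int), ?_, ?_⟩
      · rw [PySem.List.mem_pyRange_one]; constructor <;> omega
      · rw [PySem.List.pyGet?_natCast, PySem.List.pyGet?_natCast]
        simp [(by omega : k < arr1.length), (by omega : k < arr2.length), hne]

-- ===== VERDICT (by name: the statement is the Claim_ definition above) =====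
theorem array_are_equal_spec : Claim_unchanged_array_are_equal := by
  intro arr1 arr2 _
  unfold Spec_array_are_equal
  intro hD
  by_cases he : arr1 = [] ∨ arr2 = []
  · simp [array_are_equal, array_are_equal_alt, he]
  · by_cases hl : arr1.length = arr2.length
    · have hne : ¬ ((arr1.length : Int) ≠ (arr2.length : Int)) := by simp [hl]
      rw [array_are_equal, if_neg he, if_neg hne, pvLoopA_range arr1 arr2 hl,
        array_are_equal_alt, if_neg he, pvGo_eq_decide]
      push Not at he
      by_cases hd : arr1.dropLast = arr2.dropLast
      · have hq : arr1 = arr2 := by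
          by_contra hne2
          exact hD ⟨he.1, he.2, hl, hd, hne2⟩
        simp [hq]
      · have hne2 : arr1 ≠ arr2 := fun h => hd (by rw [h])
        simp [hd, hne2]
    · have h2 : (arr1.length : Int) ≠ (arr2.length : Int) := by exact_mod_cast hl
      have hne2 : arr1 ≠ arr2 := fun h => hl (by rw [h])
      rw [array_are_equal, if_neg he, if_pos h2, array_are_equal_alt, if_neg he,
        pvGo_eq_decide]
      simp [hne2]

theorem array_are_equal_changed : Claim_changed_array_are_equal := by
  unfold Claim_changed_array_are_equal; decide

theorem array_are_equal_tight : Claim_exact_array_are_equal := by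
  intro arr1 arr2 _ hD
  obtain ⟨h1, h2, hl, hd, hne⟩ := hD
  have he : ¬ (arr1 = [] ∨ arr2 = []) := by simp [h1, h2]
  have hni : ¬ ((arr1.length : Int) ≠ (arr2.length : Int)) := by simp [hl]
  rw [array_are_equal, if_neg he, if_neg hni, pvLoopA_range arr1 arr2 hl,
    array_are_equal_alt, if_neg he, pvGo_eq_decide]
  simp [hd, hne]
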